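-- pv_equiv track=rewrite | github.com/tmu-nlp/UniTP | data/dataset.py | erect_split_layers_more
-- ===== SOURCE A (Python) =====
-- def erect_split_layers_more(bid, layers, segments, offset):
--     cumu = 0
--     base = []
--     for split, s_len in zip(layers, segments):
--         base.extend((bid, cumu + s + offset) for s in split)
--         cumu += s_len + 1
--     for s_len in segments[len(layers):]:
--         base.extend((bid, cumu + s + offset) for s in (0, 1))
--         cumu += s_len + 1
--     return base
-- ===== SOURCE B (Python) =====
-- def erect_split_layers_more(bid, layers, segments, offset):
--     # precompute prefix offsets, then one flat comprehension
--     cumu = []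
--     total = 0
--     for s_len in segments:
--         cumu.append(total)
--         total += s_len + 1
--     return [(bid, cumu[i] + s + offset)
--             for i in range(len(segments))
--             for s in (layers[i] if i < len(layers) else (0, 1))]
-- ===== Notes on version B (the rewrite author's own statement) =====
-- stated objective: alternative
-- what changed: Replaces the two sequential accumulator loops (zip part plus tail part) by a precomputed prefix-offset table and a single flat comprehension over all segment indices.
import Mathlib
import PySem

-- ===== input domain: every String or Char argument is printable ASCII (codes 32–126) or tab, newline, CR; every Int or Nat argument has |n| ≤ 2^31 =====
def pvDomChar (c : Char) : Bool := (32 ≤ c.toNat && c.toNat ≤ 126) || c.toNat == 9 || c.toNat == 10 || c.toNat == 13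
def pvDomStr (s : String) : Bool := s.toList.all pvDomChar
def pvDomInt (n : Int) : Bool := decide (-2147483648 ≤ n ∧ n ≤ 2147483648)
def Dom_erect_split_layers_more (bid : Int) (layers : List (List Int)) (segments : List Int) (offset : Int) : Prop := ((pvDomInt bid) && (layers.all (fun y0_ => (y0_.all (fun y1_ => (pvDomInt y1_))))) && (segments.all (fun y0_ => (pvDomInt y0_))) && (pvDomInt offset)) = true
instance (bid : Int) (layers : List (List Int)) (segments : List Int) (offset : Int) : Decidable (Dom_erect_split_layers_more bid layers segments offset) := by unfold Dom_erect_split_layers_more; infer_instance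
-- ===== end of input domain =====

-- B replaces A's two sequential accumulator loops by a precomputed prefix-offset table
-- and a single flat pass over all segment indices (objective: alternative decomposition).

-- ===== PORT A =====
-- A: threaded state (cumu, base); first loop over zip(layers, segments), then a loop
-- over the remaining segments[len(layers):] (ported as List.drop, exact for a
-- nonnegative in-range start).
def erect_split_layers_more (bid : Int) (layers : List (List Int)) (segments : List Int) (offset : Int) : List (Int × Int) :=
  let st1 : Int × List (Int × Int) :=
    (layers.zip segments).foldl
      (fun st p => (st.1 + p.2 + 1, st.2 ++ p.1.map (fun s => (bid, st.1 + s + offset))))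
      (0, [])
  let st2 : Int × List (Int × Int) :=
    (segments.drop layers.length).foldl
      (fun st _sl => (st.1 + _sl + 1, st.2 ++ ([0, 1] : List Int).map (fun s => (bid, st.1 + s + offset))))
      st1
  st2.2

-- ===== PORT B =====
-- B: build the prefix-offset table cumu (cumu[i] = sum over j<i of segments[j]+1),
-- then one flat comprehension over range(len(segments)); indices are in range, so
-- Python's cumu[i] / layers[i] are ported as getD.
def erect_split_layers_more_alt (bid : Int) (layers : List (List Int)) (segments : List Int) (offset : Int) : List (Int × Int) :=
  let cumu : List Int :=
    (segments.foldl (fun (st : List Int × Int) s_len => (st.1 ++ [st.2], st.2 + s_len + 1)) ([], 0)).1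
  (List.range segments.length).flatMap (fun i =>
    (if i < layers.length then layers.getD i [] else ([0, 1] : List Int)).map
      (fun s => (bid, cumu.getD i 0 + s + offset)))

-- ===== PRECONDITION & SPEC =====
def Spec_erect_split_layers_more (bid : Int) (layers : List (List Int)) (segments : List Int) (offset : Int) (out : List (Int × Int)) : Prop := out = erect_split_layers_more_alt bid layers segments offset
instance (bid : Int) (layers : List (List Int)) (segments : List Int) (offset : Int) (out : List (Int × Int)) : Decidable (Spec_erect_split_layers_more bid layers segments offset out) := by unfold Spec_erect_split_layers_more; infer_instance

-- ===== CLAIM (what is proved, stated in full; the proofs are below) =====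
def Claim_equal_erect_split_layers_more : Prop := ∀ (bid : Int) (layers : List (List Int)) (segments : List Int) (offset : Int), Dom_erect_split_layers_more bid layers segments offset → Spec_erect_split_layers_more bid layers segments offset (erect_split_layers_more bid layers segments offset)

-- ===== LEMMAS AND PROOFS =====

-- Common recursive characterisation: emit the row for each segment (layer split when
-- available, else (0,1)), threading the running offset c.
def pvChain (bid off : Int) : List (List Int) → List Int → Int → List (Int × Int)
  | _, [], _ => []
  | [], s :: rest, c =>
      ([0, 1] : List Int).map (fun x => (bid, c + x + off)) ++ pvChain bid off [] rest (c + s + 1)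
  | l :: ls, s :: rest, c =>
      l.map (fun x => (bid, c + x + off)) ++ pvChain bid off ls rest (c + s + 1)

-- A's tail loop
theorem pvA_tail (bid off : Int) : ∀ (segs : List Int) (c : Int) (acc : List (Int × Int)),
    (segs.foldl
      (fun st _sl => (st.1 + _sl + 1, st.2 ++ ([0, 1] : List Int).map (fun s => (bid, st.1 + s + off))))
      (c, acc)).2 = acc ++ pvChain bid off [] segs c := by
  intro segs
  induction segs with
  | nil => intro c acc; simp [pvChain]
  | cons s rest ih =>
    intro c acc
    rw [List.foldl_cons, ih]
    simp [pvChain]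

-- A's whole computation
theorem pvA_main (bid off : Int) : ∀ (segs : List Int) (layers : List (List Int)) (c : Int) (acc : List (Int × Int)),
    ((segs.drop layers.length).foldl
      (fun st _sl => (st.1 + _sl + 1, st.2 ++ ([0, 1] : List Int).map (fun s => (bid, st.1 + s + off))))
      ((layers.zip segs).foldl
        (fun st p => (st.1 + p.2 + 1, st.2 ++ p.1.map (fun s => (bid, st.1 + s + off))))
        (c, acc))).2 = acc ++ pvChain bid off layers segs c := by
  intro segs
  induction segs with
  | nil => intro layers c acc; simp [pvChain]
  | cons s rest ih =>
    intro layers c acc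
    cases layers with
    | nil => simpa [pvChain] using pvA_tail bid off (s :: rest) c acc
    | cons l ls =>
      rw [List.zip_cons_cons, List.foldl_cons, List.length_cons, List.drop_succ_cons, ih]
      simp [pvChain]

-- B's prefix table as a recursion
def pvCumuFrom (c : Int) : List Int → List Int
  | [] => []
  | s :: rest => c :: pvCumuFrom (c + s + 1) rest

theorem pvB_cumu : ∀ (segs : List Int) (acc : List Int) (c : Int),
    (segs.foldl (fun (st : List Int × Int) s_len => (st.1 ++ [st.2], st.2 + s_len + 1)) (acc, c)).1
      = acc ++ pvCumuFrom c segs := by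
  intro segs
  induction segs with
  | nil => intro acc c; simp [pvCumuFrom]
  | cons s rest ih =>
    intro acc c
    rw [List.foldl_cons, ih]
    simp [pvCumuFrom]

-- B's flat pass
theorem pvB_main (bid off : Int) : ∀ (segs : List Int) (layers : List (List Int)) (c : Int),
    ((List.range segs.length).flatMap (fun i =>
      (if i < layers.length then layers.getD i [] else ([0, 1] : List Int)).map
        (fun s => (bid, (pvCumuFrom c segs).getD i 0 + s + off))))
      = pvChain bid off layers segs c := by
  intro segs
  induction segs with
  | nil => intro layers c; simp [pvChain]
  | cons s rest ih =>
    intro layers c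
    rw [List.length_cons, List.range_succ_eq_map]
    cases layers with
    | nil =>
      simp only [List.flatMap_cons, List.flatMap_map]
      simp [pvChain, pvCumuFrom, ← ih [] (c + s + 1)]
    | cons l ls =>
      simp only [List.flatMap_cons, List.flatMap_map]
      simp [pvChain, pvCumuFrom, ← ih ls (c + s + 1)]

-- ===== VERDICT (by name: the statement is the Claim_ definition above) =====
theorem erect_split_layers_more_spec : Claim_equal_erect_split_layers_more := by
  intro bid layers segments offset _
  unfold Spec_erect_split_layers_more erect_split_layers_more erect_split_layers_more_alt
  simp only [pvB_cumu segments [] 0, List.nil_append]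
  rw [pvA_main bid offset segments layers 0 [], pvB_main bid offset segments layers 0]
  simp
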